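-- pv_equiv track=rewrite | github.com/johnwroge/DSA | Algorithms/monotonic-stack-queue/largest-rectangle.py | countRectanglesInHistogram
-- ===== SOURCE A (Python) =====
-- def countRectanglesInHistogram(heights):
--     """
--     Count all possible rectangles in histogram
--     """
--     stack = []
--     total = 0
--
--     for i in range(len(heights)):
--         while stack and heights[i] < heights[stack[-1]]:
--             h = heights[stack.pop()]
--             w = i if not stack else i - stack[-1] - 1
--             # Number of rectangles with height >= h
--             total += h * w * (w + 1) // 2
--         stack.append(i)
--
--     while stack:
--         h = heights[stack.pop()]
--         w = len(heights) if not stack else len(heights) - stack[-1] - 1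
--         total += h * w * (w + 1) // 2
--
--     return total
-- ===== SOURCE B (Python) =====
-- def countRectanglesInHistogram(heights):
--     n = len(heights)
--     prev_le = [0] * n
--     stack = []
--     for i in range(n):
--         while stack and heights[stack[-1]] > heights[i]:
--             stack.pop()
--         prev_le[i] = stack[-1] if stack else -1
--         stack.append(i)
--     next_lt = [0] * n
--     stack = []
--     for i in range(n - 1, -1, -1):
--         while stack and heights[stack[-1]] >= heights[i]:
--             stack.pop()
--         next_lt[i] = stack[-1] if stack else n
--         stack.append(i)
--     total = 0
--     for i in range(n):
--         w = next_lt[i] - prev_le[i] - 1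
--         total += heights[i] * w * (w + 1) // 2
--     return total
-- ===== Notes on version B (the rewrite author's own statement) =====
-- stated objective: alternative
-- what changed: A's single fused monotonic-stack pass that pops and accumulates rectangle counts in place is replaced by two boundary-table passes (a left-to-right stack computing prev_le[i], the nearest previous index with height <= heights[i], and a right-to-left stack computing next_lt[i], the nearest next index with height < heights[i]) followed by a separate summation loop over the tables.
import Mathlib
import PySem

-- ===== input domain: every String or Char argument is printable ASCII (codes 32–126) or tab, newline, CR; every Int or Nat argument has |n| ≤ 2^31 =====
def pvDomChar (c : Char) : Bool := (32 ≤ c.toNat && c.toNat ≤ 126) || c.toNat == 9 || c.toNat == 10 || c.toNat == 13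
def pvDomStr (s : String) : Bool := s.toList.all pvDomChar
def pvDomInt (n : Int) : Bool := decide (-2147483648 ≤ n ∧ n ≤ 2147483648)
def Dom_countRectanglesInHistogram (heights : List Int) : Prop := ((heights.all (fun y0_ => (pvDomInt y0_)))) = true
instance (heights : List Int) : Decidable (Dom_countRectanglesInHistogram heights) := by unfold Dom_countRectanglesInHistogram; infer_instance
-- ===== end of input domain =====

-- B replaces A's fused monotonic-stack pop-and-accumulate pass by two boundary-table passes
-- (nearest previous ≤ left-to-right, nearest next < right-to-left) plus a separate summation
-- loop; same O(n) cost, different decomposition ("alternative").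

-- ===== PORT A =====

-- heights[j] for an index known to be in range (A only indexes inside the list)
def pvG (H : List Int) (j : Nat) : Int := H.getD j 0

-- the inner `while stack and heights[i] < heights[stack[-1]]` pop-and-accumulate loop
def popLoop1 (H : List Int) (i : Nat) : List Nat → Int → (List Nat × Int)
  | [], total => ([], total)
  | t :: rest, total =>
    if pvG H i < pvG H t then
      let h := pvG H t
      let w : Int := match rest with
        | [] => (i : Int)
        | t' :: _ => (i : Int) - (t' : Int) - 1
      popLoop1 H i rest (total + PySem.Int.floordiv (h * w * (w + 1)) 2)
    else (t :: rest, total)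

-- the trailing `while stack:` drain loop
def popLoop2 (H : List Int) : List Nat → Int → Int
  | [], total => total
  | t :: rest, total =>
    let h := pvG H t
    let w : Int := match rest with
      | [] => (H.length : Int)
      | t' :: _ => (H.length : Int) - (t' : Int) - 1
    popLoop2 H rest (total + PySem.Int.floordiv (h * w * (w + 1)) 2)

def countRectanglesInHistogram (heights : List Int) : Int :=
  let s := (List.range heights.length).foldl
    (fun (st : List Nat × Int) i =>
      let p := popLoop1 heights i st.1 st.2
      (i :: p.1, p.2)) ([], 0)
  popLoop2 heights s.1 s.2

-- ===== PORT B =====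

-- pass 1 inner `while stack and heights[stack[-1]] > heights[i]`
def popB1 (H : List Int) (x : Int) : List Nat → List Nat
  | [] => []
  | t :: rest => if pvG H t > x then popB1 H x rest else t :: rest

-- pass 1 body: fills prev_le (nearest previous index with height ≤) in index order
def pass1Step (H : List Int) : (List Nat × List Int) → Nat → (List Nat × List Int)
  | (st, acc), i =>
    let st' := popB1 H (pvG H i) st
    let v : Int := match st' with | [] => -1 | t :: _ => (t : Int)
    (i :: st', acc ++ [v])

-- pass 2 inner `while stack and heights[stack[-1]] >= heights[i]`
def popB2 (H : List Int) (x : Int) : List Nat → List Nat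
  | [] => []
  | t :: rest => if pvG H t ≥ x then popB2 H x rest else t :: rest

-- pass 2: `for i in range(n-1, -1, -1)`, fills next_lt (nearest next index with height <)
def pass2 (H : List Int) : Nat → List Nat → List Int → List Int
  | 0, _, acc => acc
  | i + 1, st, acc =>
    let st' := popB2 H (pvG H i) st
    let v : Int := match st' with | [] => (H.length : Int) | t :: _ => (t : Int)
    pass2 H i (i :: st') (v :: acc)

def countRectanglesInHistogram_alt (heights : List Int) : Int :=
  let n := heights.length
  let prevLE := ((List.range n).foldl (pass1Step heights) ([], [])).2
  let nextLT := pass2 heights n [] []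
  (List.range n).foldl (fun total i =>
    let w := nextLT.getD i 0 - prevLE.getD i 0 - 1
    total + PySem.Int.floordiv (pvG heights i * w * (w + 1)) 2) 0

-- ===== PRECONDITION & SPEC =====
def Spec_countRectanglesInHistogram (heights : List Int) (out : Int) : Prop := out = countRectanglesInHistogram_alt heights
instance (heights : List Int) (out : Int) : Decidable (Spec_countRectanglesInHistogram heights out) := by unfold Spec_countRectanglesInHistogram; infer_instance

-- ===== CLAIM (what is proved, stated in full; the proofs are below) =====
def Claim_equal_countRectanglesInHistogram : Prop := ∀ (heights : List Int), Dom_countRectanglesInHistogram heights → Spec_countRectanglesInHistogram heights (countRectanglesInHistogram heights)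

-- ===== LEMMAS AND PROOFS =====

-- j survived A's (and B's pass-1) stack up to time i: nothing strictly smaller appeared in (j, i)
def Alive (H : List Int) (i j : Nat) : Prop := ∀ m, m < i → j < m → pvG H j ≤ pvG H m

def aliveB (H : List Int) (i j : Nat) : Bool := decide (∀ m, m < i → j < m → pvG H j ≤ pvG H m)

-- the left-to-right stack content at time i, restricted to indices < b (head = top)
def stk (H : List Int) (i : Nat) : Nat → List Nat
  | 0 => []
  | b + 1 => if aliveB H i b then b :: stk H i b else stk H i b

-- nearest previous index with height ≤ x (as Int, -1 if none), scanning down from b-1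
def pLE (H : List Int) (x : Int) : Nat → Int
  | 0 => -1
  | k + 1 => if x < pvG H k then pLE H x k else (k : Int)

-- nearest index ≥ r with height < x (H.length if none)
def nLT (H : List Int) (x : Int) (r : Nat) : Int :=
  if h : r < H.length then (if pvG H r < x then (r : Int) else nLT H x (r + 1))
  else (H.length : Int)
termination_by H.length - r

-- the closed-form contribution of bar j
def term (H : List Int) (j : Nat) : Int :=
  let w := nLT H (pvG H j) (j + 1) - pLE H (pvG H j) j - 1
  PySem.Int.floordiv (pvG H j * w * (w + 1)) 2

def T (H : List Int) (i : Nat) : Int :=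
  ∑ j ∈ Finset.range i, (if aliveB H i j then 0 else term H j)

-- j survived B's pass-2 stack down to time c: everything in [c, j) is strictly taller
def AliveR (H : List Int) (c j : Nat) : Prop := ∀ m, m < j → c ≤ m → pvG H j < pvG H m

def aliveRB (H : List Int) (c j : Nat) : Bool := decide (∀ m, m < j → c ≤ m → pvG H j < pvG H m)

-- the right-to-left stack content at time c, restricted to indices ≥ lo (head = top)
def stkR (H : List Int) (c lo : Nat) : List Nat :=
  if h : lo < H.length then
    (if aliveRB H c lo then lo :: stkR H c (lo + 1) else stkR H c (lo + 1))
  else []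
termination_by H.length - lo

lemma aliveB_iff (H : List Int) (i j : Nat) : aliveB H i j = true ↔ Alive H i j := by
  simp [aliveB, Alive]

lemma aliveRB_iff (H : List Int) (c j : Nat) : aliveRB H c j = true ↔ AliveR H c j := by
  simp [aliveRB, AliveR]

-- basic characterisations of pLE / nLT
lemma pLE_neg (H : List Int) (x : Int) (b : Nat) (h : ∀ k, k < b → x < pvG H k) :
    pLE H x b = -1 := by
  induction b with
  | zero => rfl
  | succ k ih =>
    simp only [pLE, if_pos (h k (Nat.lt_succ_self k))]
    exact ih (fun j hj => h j (Nat.lt_succ_of_lt hj))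

lemma pLE_eq (H : List Int) (x : Int) (b k : Nat) (hk : k < b) (hle : pvG H k ≤ x)
    (hmax : ∀ m, k < m → m < b → x < pvG H m) : pLE H x b = (k : Int) := by
  induction b with
  | zero => omega
  | succ m ih =>
    rcases Nat.lt_succ_iff_lt_or_eq.mp hk with h' | h'
    · simp only [pLE, if_pos (hmax m h' (Nat.lt_succ_self m))]
      exact ih h' (fun j hj1 hj2 => hmax j hj1 (Nat.lt_succ_of_lt hj2))
    · subst h'; simp only [pLE, if_neg (not_lt.mpr hle)]

lemma nLT_all (H : List Int) (x : Int) (s : Nat)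
    (h : ∀ m, s ≤ m → m < H.length → x ≤ pvG H m) : nLT H x s = (H.length : Int) := by
  rw [nLT]
  split
  · next hs =>
      rw [if_neg (not_lt.mpr (h s le_rfl hs))]
      exact nLT_all H x (s + 1) (fun m hm => h m (by omega))
  · rfl
termination_by H.length - s

lemma nLT_eq (H : List Int) (x : Int) (s r : Nat) (hsr : s ≤ r) (hr : r < H.length)
    (hlt : pvG H r < x) (hmin : ∀ m, s ≤ m → m < r → x ≤ pvG H m) :
    nLT H x s = (r : Int) := by
  rw [nLT, dif_pos (lt_of_le_of_lt hsr hr)]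
  rcases eq_or_lt_of_le hsr with h' | h'
  · subst h'; rw [if_pos hlt]
  · rw [if_neg (not_lt.mpr (hmin s le_rfl h'))]
    exact nLT_eq H x (s + 1) r h' hr hlt (fun m hm => hmin m (by omega))
termination_by H.length - s

-- stk structure
lemma stk_nil (H : List Int) (i b : Nat) (h : stk H i b = []) :
    ∀ j, j < b → ¬ Alive H i j := by
  induction b with
  | zero => omega
  | succ k ih =>
    intro j hj
    by_cases hk : aliveB H i k = true
    · simp [stk, hk] at h
    · rcases Nat.lt_succ_iff_lt_or_eq.mp hj with h' | h'
      · exact ih (by simpa [stk, hk] using h) j h'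
      · subst h'; exact fun hA => hk ((aliveB_iff H i j).mpr hA)

lemma stk_cons (H : List Int) (i b t : Nat) (r : List Nat) (h : stk H i b = t :: r) :
    t < b ∧ Alive H i t ∧ (∀ m, t < m → m < b → ¬ Alive H i m) ∧ r = stk H i t := by
  induction b with
  | zero => simp [stk] at h
  | succ k ih =>
    by_cases hk : aliveB H i k = true
    · simp only [stk, hk, if_true] at h
      injection h with h1 h2
      subst h1
      exact ⟨Nat.lt_succ_self k, (aliveB_iff H i k).mp hk, by omega, h2.symm⟩
    · simp only [stk, hk, if_false, Bool.false_eq_true] at h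
      obtain ⟨h1, h2, h3, h4⟩ := ih h
      refine ⟨Nat.lt_succ_of_lt h1, h2, ?_, h4⟩
      intro m hm1 hm2
      rcases Nat.lt_succ_iff_lt_or_eq.mp hm2 with h' | h'
      · exact h3 m hm1 h'
      · subst h'; exact fun hA => hk ((aliveB_iff H i m).mpr hA)

-- below an alive j there is an alive witness above any k with height ≤ height j
lemma exists_alive_le (H : List Int) (i j : Nat) (hAj : Alive H i j) :
    ∀ k, k < j → pvG H k ≤ pvG H j →
      ∃ k', k ≤ k' ∧ k' < j ∧ pvG H k' ≤ pvG H j ∧ Alive H i k' := by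
  suffices hs : ∀ n k, j - k ≤ n → k < j → pvG H k ≤ pvG H j →
      ∃ k', k ≤ k' ∧ k' < j ∧ pvG H k' ≤ pvG H j ∧ Alive H i k' by
    intro k hk hle; exact hs (j - k) k le_rfl hk hle
  intro n
  induction n with
  | zero => intro k h0 hk _; omega
  | succ n ih =>
    intro k hbound hk hle
    by_cases hall : ∀ m, k < m → m < j → pvG H j < pvG H m
    · refine ⟨k, le_rfl, hk, hle, ?_⟩
      intro m hm hjm
      rcases lt_trichotomy m j with h1 | h1 | h1
      · exact le_of_lt (lt_of_le_of_lt hle (hall m hjm h1))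
      · subst h1; exact hle
      · exact le_trans hle (hAj m hm h1)
    · push Not at hall
      obtain ⟨m, hkm, hmj, hmle⟩ := hall
      obtain ⟨k', h1, h2, h3, h4⟩ := ih m (by omega) hmj hmle
      exact ⟨k', le_trans (le_of_lt hkm) h1, h2, h3, h4⟩

-- the stack top below an alive j is exactly its nearest-previous-≤ boundary
lemma pLE_stk (H : List Int) (i j : Nat) (hji : j < i) (hAj : Alive H i j) :
    pLE H (pvG H j) j = (match stk H i j with | [] => (-1 : Int) | t :: _ => (t : Int)) := by
  cases hstk : stk H i j with
  | nil =>
    have hno := stk_nil H i j hstk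
    apply pLE_neg
    intro k hk
    by_contra hle
    push Not at hle
    obtain ⟨k', _, hk', _, hA'⟩ := exists_alive_le H i j hAj k hk hle
    exact hno k' hk' hA'
  | cons t r =>
    obtain ⟨htj, hAt, hnone, _⟩ := stk_cons H i j t r hstk
    apply pLE_eq H _ j t htj
    · exact hAt j hji htj
    · intro m hm1 hm2
      by_contra hle
      push Not at hle
      obtain ⟨k', hk1, hk2, _, hA'⟩ := exists_alive_le H i j hAj m hm2 hle
      exact hnone k' (lt_of_lt_of_le hm1 hk1) hk2 hA'

lemma alive_succ_iff (H : List Int) (i j : Nat) (hj : j < i) :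
    Alive H (i + 1) j ↔ (Alive H i j ∧ pvG H j ≤ pvG H i) := by
  constructor
  · intro hA
    exact ⟨fun m hm hjm => hA m (by omega) hjm, hA i (by omega) hj⟩
  · rintro ⟨hA, hle⟩ m hm hjm
    rcases Nat.lt_succ_iff_lt_or_eq.mp hm with h' | h'
    · exact hA m h' hjm
    · subst h'; exact hle

lemma stk_eq_of_le (H : List Int) (i b : Nat) (hb : b ≤ i)
    (h : ∀ j, j < b → Alive H i j → pvG H j ≤ pvG H i) :
    stk H (i + 1) b = stk H i b := by
  induction b with
  | zero => rfl
  | succ k ih =>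
    have hk : k < i := by omega
    have hb : aliveB H (i + 1) k = aliveB H i k := by
      by_cases hA : Alive H i k
      · have h1 : aliveB H i k = true := (aliveB_iff H i k).mpr hA
        have h2 : aliveB H (i + 1) k = true :=
          (aliveB_iff H (i + 1) k).mpr ((alive_succ_iff H i k hk).mpr ⟨hA, h k (Nat.lt_succ_self k) hA⟩)
        rw [h1, h2]
      · have h1 : aliveB H i k = false := by
          cases hv : aliveB H i k
          · rfl
          · exact absurd ((aliveB_iff H i k).mp hv) hA
        have h2 : aliveB H (i + 1) k = false := by
          cases hv : aliveB H (i + 1) k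
          · rfl
          · exact absurd (((alive_succ_iff H i k hk).mp ((aliveB_iff H (i + 1) k).mp hv)).1) hA
        rw [h1, h2]
    have ih' := ih (by omega) (fun j hj hA => h j (Nat.lt_succ_of_lt hj) hA)
    simp only [stk, hb, ih']

-- the pop-and-accumulate loop, characterised against the closed-form terms
lemma popLoop1_spec (H : List Int) (i : Nat) (hi : i < H.length) :
    ∀ b, b ≤ i → ∀ tot,
      popLoop1 H i (stk H i b) tot =
        (stk H (i + 1) b,
         tot + ∑ j ∈ Finset.range b,
           (if aliveB H i j ∧ pvG H i < pvG H j then term H j else 0)) := by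
  intro b
  induction b with
  | zero => intro _ tot; simp [stk, popLoop1]
  | succ b ih =>
    intro hb tot
    have hbi : b < i := by omega
    by_cases hA : Alive H i b
    · have hab : aliveB H i b = true := (aliveB_iff H i b).mpr hA
      by_cases hpop : pvG H i < pvG H b
      · have hnlt : nLT H (pvG H b) (b + 1) = (i : Int) :=
          nLT_eq H _ (b + 1) i (by omega) hi hpop (fun m hm1 hm2 => hA m hm2 (by omega))
        have hple := pLE_stk H i b hbi hA
        have hnab : aliveB H (i + 1) b = false := by
          cases hv : aliveB H (i + 1) b
          · rfl
          · have := ((alive_succ_iff H i b hbi).mp ((aliveB_iff H (i + 1) b).mp hv)).2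
            omega
        have hstk1 : stk H (i + 1) (b + 1) = stk H (i + 1) b := by
          simp [stk, hnab]
        have hw : (match stk H i b with | [] => (i : Int) | t' :: _ => (i : Int) - (t' : Int) - 1)
            = nLT H (pvG H b) (b + 1) - pLE H (pvG H b) b - 1 := by
          rw [hnlt, hple]
          cases stk H i b with
          | nil => ring
          | cons t' r => ring
        simp only [stk, hab, if_true, popLoop1, if_pos hpop]
        have hc2 : aliveB H i b = true ∧ pvG H i < pvG H b := ⟨hab, hpop⟩
        rw [hw, ih (by omega), hnab, Finset.sum_range_succ, if_pos hc2]
        simp only [Bool.false_eq_true, if_false]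
        refine Prod.ext rfl ?_
        show _ + _ = _
        simp only [term]
        ring
      · have hle : pvG H b ≤ pvG H i := not_lt.mp hpop
        have hab2 : aliveB H (i + 1) b = true :=
          (aliveB_iff H (i + 1) b).mpr ((alive_succ_iff H i b hbi).mpr ⟨hA, hle⟩)
        have heq : stk H (i + 1) b = stk H i b := by
          apply stk_eq_of_le H i b (le_of_lt hbi)
          intro j hj hAj
          exact le_trans (hAj b hbi hj) hle
        have hstk2 : stk H (i + 1) (b + 1) = b :: stk H i b := by
          simp [stk, hab2, heq]
        have hzero : (∑ j ∈ Finset.range (b + 1),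
            (if aliveB H i j ∧ pvG H i < pvG H j then term H j else 0)) = 0 := by
          apply Finset.sum_eq_zero
          intro j hj
          apply if_neg
          rintro ⟨hAj, hgt⟩
          have hAj' := (aliveB_iff H i j).mp hAj
          have hjb : j < b + 1 := Finset.mem_range.mp hj
          rcases Nat.lt_succ_iff_lt_or_eq.mp hjb with h' | h'
          · have := le_trans (hAj' b hbi h') hle
            omega
          · subst h'; omega
        simp only [stk, hab, if_true, popLoop1, if_neg hpop]
        rw [hab2, hzero, add_zero]
        simp only [if_true]
        rw [heq]
    · have hab : aliveB H i b = false := by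
        cases hv : aliveB H i b
        · rfl
        · exact absurd ((aliveB_iff H i b).mp hv) hA
      have hnab : aliveB H (i + 1) b = false := by
        cases hv : aliveB H (i + 1) b
        · rfl
        · exact absurd (((alive_succ_iff H i b hbi).mp ((aliveB_iff H (i + 1) b).mp hv)).1) hA
      simp only [stk, hab, hnab, Bool.false_eq_true, if_false]
      rw [ih (by omega), Finset.sum_range_succ,
          if_neg (show ¬(aliveB H i b = true ∧ pvG H i < pvG H b) by
            rintro ⟨hc, _⟩; rw [hab] at hc; exact absurd hc (by simp)), add_zero]

lemma mainLoop_inv (H : List Int) :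
    ∀ i, i ≤ H.length →
      (List.range i).foldl
        (fun (st : List Nat × Int) k =>
          let p := popLoop1 H k st.1 st.2
          (k :: p.1, p.2)) ([], 0) = (stk H i i, T H i) := by
  intro i
  induction i with
  | zero => intro _; simp [T, stk]
  | succ i ih =>
    intro hi
    rw [List.range_succ, List.foldl_append, ih (by omega), List.foldl_cons, List.foldl_nil]
    show (i :: (popLoop1 H i (stk H i i) (T H i)).1, (popLoop1 H i (stk H i i) (T H i)).2) = _
    rw [popLoop1_spec H i (by omega) i le_rfl]
    have habi : aliveB H (i + 1) i = true := by
      rw [aliveB_iff]; intro m hm hjm; omega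
    refine Prod.ext ?_ ?_
    · show i :: stk H (i + 1) i = stk H (i + 1) (i + 1)
      simp [stk, habi]
    · show T H i + _ = T H (i + 1)
      rw [T, T, Finset.sum_range_succ, if_pos habi, add_zero, ← Finset.sum_add_distrib]
      apply Finset.sum_congr rfl
      intro j hj
      have hji : j < i := Finset.mem_range.mp hj
      by_cases hA : Alive H i j
      · have h1 : aliveB H i j = true := (aliveB_iff H i j).mpr hA
        by_cases h2 : pvG H j ≤ pvG H i
        · have h3 : aliveB H (i + 1) j = true :=
            (aliveB_iff H (i + 1) j).mpr ((alive_succ_iff H i j hji).mpr ⟨hA, h2⟩)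
          rw [if_pos h1, if_pos h3, if_neg (by rintro ⟨_, hgt⟩; omega), add_zero]
        · have h3 : aliveB H (i + 1) j = false := by
            cases hv : aliveB H (i + 1) j
            · rfl
            · have := ((alive_succ_iff H i j hji).mp ((aliveB_iff H (i + 1) j).mp hv)).2
              omega
          have hc2 : aliveB H i j = true ∧ pvG H i < pvG H j := ⟨h1, by omega⟩
          rw [if_pos h1, if_pos hc2, if_neg (show ¬ aliveB H (i + 1) j = true by rw [h3]; simp), zero_add]
      · have h1 : aliveB H i j = false := by
          cases hv : aliveB H i j
          · rfl
          · exact absurd ((aliveB_iff H i j).mp hv) hA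
        have h3 : aliveB H (i + 1) j = false := by
          cases hv : aliveB H (i + 1) j
          · rfl
          · exact absurd (((alive_succ_iff H i j hji).mp ((aliveB_iff H (i + 1) j).mp hv)).1) hA
        rw [if_neg (show ¬ aliveB H i j = true by rw [h1]; simp),
            if_neg (show ¬(aliveB H i j = true ∧ pvG H i < pvG H j) by
              rintro ⟨hc, _⟩; rw [h1] at hc; exact absurd hc (by simp)),
            if_neg (show ¬ aliveB H (i + 1) j = true by rw [h3]; simp), add_zero]

lemma popLoop2_spec (H : List Int) :
    ∀ b, b ≤ H.length → ∀ tot,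
      popLoop2 H (stk H H.length b) tot =
        tot + ∑ j ∈ Finset.range b, (if aliveB H H.length j then term H j else 0) := by
  intro b
  induction b with
  | zero => intro _ tot; simp [stk, popLoop2]
  | succ b ih =>
    intro hb tot
    have hbn : b < H.length := by omega
    by_cases hA : Alive H H.length b
    · have hab : aliveB H H.length b = true := (aliveB_iff H H.length b).mpr hA
      have hnlt : nLT H (pvG H b) (b + 1) = (H.length : Int) :=
        nLT_all H _ (b + 1) (fun m hm1 hm2 => hA m hm2 (by omega))
      have hple := pLE_stk H H.length b hbn hA
      have hw : (match stk H H.length b with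
            | [] => (H.length : Int) | t' :: _ => (H.length : Int) - (t' : Int) - 1)
          = nLT H (pvG H b) (b + 1) - pLE H (pvG H b) b - 1 := by
        rw [hnlt, hple]
        cases stk H H.length b with
        | nil => ring
        | cons t' r => ring
      simp only [stk, hab, if_true, popLoop2]
      rw [hw, ih (by omega), Finset.sum_range_succ, if_pos hab]
      simp only [term]
      ring
    · have hab : aliveB H H.length b = false := by
        cases hv : aliveB H H.length b
        · rfl
        · exact absurd ((aliveB_iff H H.length b).mp hv) hA
      simp only [stk, hab, Bool.false_eq_true, if_false]
      rw [ih (by omega), Finset.sum_range_succ,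
          if_neg (by rw [hab]; simp), add_zero]

lemma A_eq_sum (H : List Int) :
    countRectanglesInHistogram H = ∑ j ∈ Finset.range H.length, term H j := by
  show popLoop2 H _ _ = _
  rw [mainLoop_inv H H.length le_rfl]
  show popLoop2 H (stk H H.length H.length) (T H H.length) = _
  rw [popLoop2_spec H H.length le_rfl, T, ← Finset.sum_add_distrib]
  apply Finset.sum_congr rfl
  intro j hj
  by_cases hb : aliveB H H.length j = true
  · rw [if_pos hb, if_pos hb, zero_add]
  · rw [if_neg hb, if_neg hb, add_zero]

-- ===== B side =====

lemma popB1_spec (H : List Int) (i : Nat) :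
    ∀ b, b ≤ i → popB1 H (pvG H i) (stk H i b) = stk H (i + 1) b := by
  intro b
  induction b with
  | zero => intro _; simp [stk, popB1]
  | succ b ih =>
    intro hb
    have hbi : b < i := by omega
    by_cases hA : Alive H i b
    · have hab : aliveB H i b = true := (aliveB_iff H i b).mpr hA
      by_cases hpop : pvG H b > pvG H i
      · have hnab : aliveB H (i + 1) b = false := by
          cases hv : aliveB H (i + 1) b
          · rfl
          · have := ((alive_succ_iff H i b hbi).mp ((aliveB_iff H (i + 1) b).mp hv)).2
            omega
        simp only [stk, hab, if_true, popB1, if_pos hpop, hnab, Bool.false_eq_true, if_false]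
        exact ih (by omega)
      · have hle : pvG H b ≤ pvG H i := not_lt.mp hpop
        have hab2 : aliveB H (i + 1) b = true :=
          (aliveB_iff H (i + 1) b).mpr ((alive_succ_iff H i b hbi).mpr ⟨hA, hle⟩)
        have heq : stk H (i + 1) b = stk H i b := by
          apply stk_eq_of_le H i b (le_of_lt hbi)
          intro j hj hAj
          exact le_trans (hAj b hbi hj) hle
        simp only [stk, hab, if_true, popB1, if_neg hpop, hab2, heq]
    · have hab : aliveB H i b = false := by
        cases hv : aliveB H i b
        · rfl
        · exact absurd ((aliveB_iff H i b).mp hv) hA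
      have hnab : aliveB H (i + 1) b = false := by
        cases hv : aliveB H (i + 1) b
        · rfl
        · exact absurd (((alive_succ_iff H i b hbi).mp ((aliveB_iff H (i + 1) b).mp hv)).1) hA
      simp only [stk, hab, hnab, Bool.false_eq_true, if_false]
      exact ih (by omega)

lemma pass1_inv (H : List Int) :
    ∀ i, i ≤ H.length →
      (List.range i).foldl (pass1Step H) ([], []) =
        (stk H i i, (List.range i).map (fun j => pLE H (pvG H j) j)) := by
  intro i
  induction i with
  | zero => intro _; simp [stk]
  | succ i ih =>
    intro hi
    rw [List.range_succ, List.foldl_append, ih (by omega), List.foldl_cons, List.foldl_nil]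
    simp only [pass1Step]
    rw [popB1_spec H i i le_rfl]
    have habi : aliveB H (i + 1) i = true := by
      rw [aliveB_iff]; intro m hm hjm; omega
    have hAi : Alive H (i + 1) i := by intro m hm hjm; omega
    have hple := pLE_stk H (i + 1) i (Nat.lt_succ_self i) hAi
    refine Prod.ext ?_ ?_
    · show i :: stk H (i + 1) i = stk H (i + 1) (i + 1)
      simp [stk, habi]
    · show List.map (fun j => pLE H (pvG H j) j) (List.range i) ++
          [(match stk H (i + 1) i with | [] => (-1 : Int) | t :: _ => (t : Int))] =
        List.map (fun j => pLE H (pvG H j) j) (List.range i ++ [i])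
      rw [List.map_append]
      simp only [List.map_cons, List.map_nil]
      rw [← hple]

-- stkR structure
lemma stkR_nil (H : List Int) (c lo : Nat) (h : stkR H c lo = []) :
    ∀ j, lo ≤ j → j < H.length → ¬ AliveR H c j := by
  intro j hj1 hj2
  rw [stkR] at h
  by_cases hlo : lo < H.length
  · rw [dif_pos hlo] at h
    by_cases ha : aliveRB H c lo = true
    · rw [if_pos ha] at h
      exact absurd h (List.cons_ne_nil _ _)
    · rw [if_neg ha] at h
      rcases eq_or_lt_of_le hj1 with rfl | hlt
      · exact fun hA => ha ((aliveRB_iff _ _ _).mpr hA)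
      · exact stkR_nil H c (lo + 1) h j hlt hj2
  · omega
termination_by H.length - lo

lemma stkR_cons (H : List Int) (c lo t : Nat) (r : List Nat) (h : stkR H c lo = t :: r) :
    lo ≤ t ∧ t < H.length ∧ AliveR H c t ∧ (∀ m, lo ≤ m → m < t → ¬ AliveR H c m) := by
  rw [stkR] at h
  by_cases hlo : lo < H.length
  · rw [dif_pos hlo] at h
    by_cases ha : aliveRB H c lo = true
    · rw [if_pos ha] at h
      injection h with h1 h2
      subst h1
      exact ⟨le_rfl, hlo, (aliveRB_iff H c lo).mp ha, fun m hm1 hm2 => by omega⟩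
    · rw [if_neg ha] at h
      obtain ⟨h1, h2, h3, h4⟩ := stkR_cons H c (lo + 1) t r h
      refine ⟨by omega, h2, h3, ?_⟩
      intro m hm1 hm2
      rcases eq_or_lt_of_le hm1 with rfl | hlt
      · exact fun hA => ha ((aliveRB_iff _ _ _).mpr hA)
      · exact h4 m hlt hm2
  · rw [dif_neg hlo] at h
    exact absurd h.symm (List.cons_ne_nil _ _)
termination_by H.length - lo

lemma aliveR_succ_iff (H : List Int) (i j : Nat) (hj : i < j) :
    AliveR H i j ↔ (AliveR H (i + 1) j ∧ pvG H j < pvG H i) := by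
  constructor
  · intro hA
    exact ⟨fun m hm hcm => hA m hm (by omega), hA i hj le_rfl⟩
  · rintro ⟨hA, hlt⟩ m hm hcm
    rcases eq_or_lt_of_le hcm with rfl | h'
    · exact hlt
    · exact hA m hm (by omega)

lemma exists_aliveR_lt (H : List Int) (i : Nat) :
    ∀ j, i < j → j < H.length → pvG H j < pvG H i →
      ∃ j', i < j' ∧ j' ≤ j ∧ pvG H j' < pvG H i ∧ AliveR H i j' := by
  suffices hs : ∀ n j, j - i ≤ n → i < j → j < H.length → pvG H j < pvG H i →
      ∃ j', i < j' ∧ j' ≤ j ∧ pvG H j' < pvG H i ∧ AliveR H i j' by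
    intro j h1 h2 h3; exact hs (j - i) j le_rfl h1 h2 h3
  intro n
  induction n with
  | zero => intro j h0 h1 _ _; omega
  | succ n ih =>
    intro j hbound hij hjn hlt
    by_cases hall : ∀ m, i < m → m < j → pvG H i ≤ pvG H m
    · refine ⟨j, hij, le_rfl, hlt, ?_⟩
      intro m hm hcm
      rcases eq_or_lt_of_le hcm with rfl | h'
      · exact hlt
      · exact lt_of_lt_of_le hlt (hall m h' hm)
    · push Not at hall
      obtain ⟨m, h1, h2, h3⟩ := hall
      obtain ⟨j', hh1, hh2, hh3, hh4⟩ := ih m (by omega) h1 (by omega) h3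
      exact ⟨j', hh1, by omega, hh3, hh4⟩

lemma stkR_eq_of_lt (H : List Int) (i lo : Nat)
    (h : ∀ j, lo ≤ j → j < H.length → AliveR H (i + 1) j → pvG H j < pvG H i)
    (hilo : i < lo) : stkR H i lo = stkR H (i + 1) lo := by
  by_cases hlo : lo < H.length
  · have hb : aliveRB H i lo = aliveRB H (i + 1) lo := by
      by_cases hA : AliveR H (i + 1) lo
      · have h1 : aliveRB H (i + 1) lo = true := (aliveRB_iff H (i + 1) lo).mpr hA
        have h2 : aliveRB H i lo = true :=
          (aliveRB_iff H i lo).mpr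
            ((aliveR_succ_iff H i lo hilo).mpr ⟨hA, h lo le_rfl hlo hA⟩)
        rw [h1, h2]
      · have h1 : aliveRB H (i + 1) lo = false := by
          cases hv : aliveRB H (i + 1) lo
          · rfl
          · exact absurd ((aliveRB_iff H (i + 1) lo).mp hv) hA
        have h2 : aliveRB H i lo = false := by
          cases hv : aliveRB H i lo
          · rfl
          · exact absurd (((aliveR_succ_iff H i lo hilo).mp ((aliveRB_iff H i lo).mp hv)).1) hA
        rw [h1, h2]
    have hrec : stkR H i (lo + 1) = stkR H (i + 1) (lo + 1) :=
      stkR_eq_of_lt H i (lo + 1) (fun j hj1 hj2 hAj => h j (by omega) hj2 hAj) (by omega)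
    rw [show stkR H i lo = if aliveRB H i lo = true then lo :: stkR H i (lo + 1)
          else stkR H i (lo + 1) from by rw [stkR, dif_pos hlo]]
    rw [show stkR H (i + 1) lo = if aliveRB H (i + 1) lo = true then lo :: stkR H (i + 1) (lo + 1)
          else stkR H (i + 1) (lo + 1) from by rw [stkR, dif_pos hlo]]
    rw [hb, hrec]
  · rw [show stkR H i lo = [] from by rw [stkR, dif_neg hlo]]
    rw [show stkR H (i + 1) lo = [] from by rw [stkR, dif_neg hlo]]
termination_by H.length - lo

lemma popB2_spec (H : List Int) (i : Nat) :
    ∀ lo, i + 1 ≤ lo → popB2 H (pvG H i) (stkR H (i + 1) lo) = stkR H i lo := by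
  intro lo
  induction hn : H.length - lo using Nat.strong_induction_on generalizing lo with
  | _ n ihn =>
  intro hlo
  by_cases hln : lo < H.length
  · by_cases hA : AliveR H (i + 1) lo
    · have ha : aliveRB H (i + 1) lo = true := (aliveRB_iff H (i + 1) lo).mpr hA
      rw [show stkR H (i + 1) lo = lo :: stkR H (i + 1) (lo + 1) from by
        rw [stkR, dif_pos hln, if_pos ha]]
      by_cases hge : pvG H lo ≥ pvG H i
      · simp only [popB2, if_pos hge]
        have hrec := ihn (H.length - (lo + 1)) (by omega) (lo + 1) rfl (by omega)
        rw [hrec]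
        have hna : aliveRB H i lo = false := by
          cases hv : aliveRB H i lo
          · rfl
          · have := ((aliveR_succ_iff H i lo (by omega)).mp ((aliveRB_iff H i lo).mp hv)).2
            omega
        rw [show stkR H i lo = stkR H i (lo + 1) from by
          rw [stkR, dif_pos hln, if_neg (by rw [hna]; simp)]]
      · simp only [popB2, if_neg hge]
        have hlt : pvG H lo < pvG H i := lt_of_not_ge hge
        have ha2 : aliveRB H i lo = true :=
          (aliveRB_iff H i lo).mpr ((aliveR_succ_iff H i lo (by omega)).mpr ⟨hA, hlt⟩)
        have heq : stkR H i (lo + 1) = stkR H (i + 1) (lo + 1) := by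
          apply stkR_eq_of_lt H i (lo + 1) ?_ (by omega)
          intro j hj1 hj2 hAj
          exact lt_trans (hAj lo (by omega) (by omega)) hlt
        rw [show stkR H i lo = lo :: stkR H i (lo + 1) from by
          rw [stkR, dif_pos hln, if_pos ha2], heq]
    · have ha : aliveRB H (i + 1) lo = false := by
        cases hv : aliveRB H (i + 1) lo
        · rfl
        · exact absurd ((aliveRB_iff H (i + 1) lo).mp hv) hA
      have hna : aliveRB H i lo = false := by
        cases hv : aliveRB H i lo
        · rfl
        · exact absurd (((aliveR_succ_iff H i lo (by omega)).mp ((aliveRB_iff H i lo).mp hv)).1) hA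
      rw [show stkR H (i + 1) lo = stkR H (i + 1) (lo + 1) from by
        rw [stkR, dif_pos hln, if_neg (by rw [ha]; simp)]]
      rw [show stkR H i lo = stkR H i (lo + 1) from by
        rw [stkR, dif_pos hln, if_neg (by rw [hna]; simp)]]
      exact ihn (H.length - (lo + 1)) (by omega) (lo + 1) rfl (by omega)
  · rw [show stkR H (i + 1) lo = [] from by rw [stkR, dif_neg hln]]
    rw [show stkR H i lo = [] from by rw [stkR, dif_neg hln]]
    rfl

-- the pass-2 stack top at time i is exactly the nearest-next-< boundary
lemma nLT_stkR (H : List Int) (i : Nat) (hi : i < H.length) :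
    (match stkR H i (i + 1) with
      | [] => (H.length : Int) | t :: _ => (t : Int)) = nLT H (pvG H i) (i + 1) := by
  cases hstk : stkR H i (i + 1) with
  | nil =>
    have hno := stkR_nil H i (i + 1) hstk
    rw [nLT_all H _ (i + 1) ?_]
    intro m hm1 hm2
    by_contra hle
    push Not at hle
    obtain ⟨j', h1, h2, h3, h4⟩ := exists_aliveR_lt H i m (by omega) hm2 hle
    exact hno j' (by omega) (by omega) h4
  | cons t r =>
    obtain ⟨h1, h2, h3, h4⟩ := stkR_cons H i (i + 1) t r hstk
    rw [nLT_eq H _ (i + 1) t h1 h2 (h3 i (by omega) le_rfl) ?_]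
    intro m hm1 hm2
    by_contra hle
    push Not at hle
    obtain ⟨j', hh1, hh2, hh3, hh4⟩ := exists_aliveR_lt H i m (by omega) (by omega) hle
    exact h4 j' (by omega) (by omega) hh4

lemma pass2_inv (H : List Int) :
    ∀ c, c ≤ H.length → ∀ acc,
      pass2 H c (stkR H c c) acc =
        (List.range c).map (fun j => nLT H (pvG H j) (j + 1)) ++ acc := by
  intro c
  induction c with
  | zero => intro _ acc; simp [pass2]
  | succ c ih =>
    intro hc acc
    have hcn : c < H.length := by omega
    simp only [pass2]
    rw [popB2_spec H c (c + 1) le_rfl]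
    rw [nLT_stkR H c hcn]
    have hcons : c :: stkR H c (c + 1) = stkR H c c := by
      have ha : aliveRB H c c = true := by
        rw [aliveRB_iff]; intro m hm1 hm2; omega
      rw [show stkR H c c = c :: stkR H c (c + 1) from by
        rw [stkR, dif_pos hcn, if_pos ha]]
    rw [hcons, ih (by omega)]
    rw [List.range_succ, List.map_append, List.append_assoc]
    rfl

lemma B_eq_sum (H : List Int) :
    countRectanglesInHistogram_alt H = ∑ j ∈ Finset.range H.length, term H j := by
  have hgetP : ∀ j, j < H.length →
      (((List.range H.length).foldl (pass1Step H) ([], [])).2).getD j 0 = pLE H (pvG H j) j := by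
    intro j hj
    rw [pass1_inv H H.length le_rfl]
    simp [List.getD_eq_getElem?_getD, List.getElem?_map, List.getElem?_range hj]
  have hgetN : ∀ j, j < H.length →
      (pass2 H H.length [] []).getD j 0 = nLT H (pvG H j) (j + 1) := by
    intro j hj
    have h0 : stkR H H.length H.length = [] := by
      rw [stkR, dif_neg (lt_irrefl _)]
    rw [show pass2 H H.length [] [] = pass2 H H.length (stkR H H.length H.length) [] from by
      rw [h0]]
    rw [pass2_inv H H.length le_rfl, List.append_nil]
    simp [List.getD_eq_getElem?_getD, List.getElem?_map, List.getElem?_range hj]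
  show (List.range H.length).foldl _ 0 = _
  suffices hs : ∀ k, k ≤ H.length → ∀ (a : Int),
      (List.range k).foldl (fun total i =>
        total + PySem.Int.floordiv (pvG H i *
          ((pass2 H H.length [] []).getD i 0 -
            (((List.range H.length).foldl (pass1Step H) ([], [])).2).getD i 0 - 1) *
          (((pass2 H H.length [] []).getD i 0 -
            (((List.range H.length).foldl (pass1Step H) ([], [])).2).getD i 0 - 1) + 1)) 2) a
        = a + ∑ j ∈ Finset.range k, term H j by
    simpa using hs H.length le_rfl 0
  intro k
  induction k with
  | zero => intro _ a; simp
  | succ k ih =>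
    intro hk a
    rw [List.range_succ, List.foldl_append, ih (by omega), List.foldl_cons, List.foldl_nil,
        Finset.sum_range_succ]
    rw [hgetP k (by omega), hgetN k (by omega)]
    simp only [term]
    ring

-- ===== VERDICT (by name: the statement is the Claim_ definition above) =====
theorem countRectanglesInHistogram_spec : Claim_equal_countRectanglesInHistogram := by
  intro heights _
  show countRectanglesInHistogram heights = countRectanglesInHistogram_alt heights
  rw [A_eq_sum, B_eq_sum]
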